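-- pv_equiv track=rewrite | github.com/CarryCKW/MathematicalModeling-SourceCode | 2020_CUMCM/MCM2020/A/p4.py | getTI
-- ===== SOURCE A (Python) =====
-- def getTI(x, y):
--     T = -1
--     index = -1
--     p1 = 0
--     findS = False
--     for idx, ti in enumerate(y):
--         if findS == False and ti>=217:
--             p1 = idx
--             findS = True
--         if ti > T:
--             T = ti
--             index = idx
--     return T, index, p1
-- ===== SOURCE B (Python) =====
-- def getTI(x, y):
--     T = max(y, default=-1)
--     if T <= -1:
--         T, index = -1, -1
--     else:
--         index = y.index(T)
--     p1 = next((i for i, v in enumerate(y) if v >= 217), 0)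
--     return T, index, p1
-- ===== Notes on version B (the rewrite author's own statement) =====
-- stated objective: idiomatic
-- what changed: A's single fused loop carrying four state variables (running max, its index, first >=217 index, a found flag) is replaced by three independent builtin passes: max(y, default=-1), y.index(T), and next() over a generator for the first element >= 217, with A's (-1,-1) sentinel kept for the case max(y) <= -1.
import Mathlib
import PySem

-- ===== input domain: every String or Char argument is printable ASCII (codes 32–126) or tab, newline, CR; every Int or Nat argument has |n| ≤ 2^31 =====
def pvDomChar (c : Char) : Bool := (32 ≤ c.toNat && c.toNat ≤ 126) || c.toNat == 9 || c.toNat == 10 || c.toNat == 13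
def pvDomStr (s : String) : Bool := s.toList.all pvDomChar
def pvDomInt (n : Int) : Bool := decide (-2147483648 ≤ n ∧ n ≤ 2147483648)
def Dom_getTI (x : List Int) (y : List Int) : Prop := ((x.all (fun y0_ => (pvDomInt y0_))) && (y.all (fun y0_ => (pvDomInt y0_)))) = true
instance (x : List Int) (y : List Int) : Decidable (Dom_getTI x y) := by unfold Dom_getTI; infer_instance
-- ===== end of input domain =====

-- B replaces A's fused scan by three builtin passes (max, index, first >= 217); objective: simpler/idiomatic; return value only.

-- ===== PORT A =====
-- loop body of A's single for-loop over enumerate(y); state = (T, index, p1, findS)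
def getTI_step (st : Int × Int × Int × Bool) (p : Int × Int) : Int × Int × Int × Bool :=
  let T := st.1; let index := st.2.1; let p1 := st.2.2.1; let findS := st.2.2.2
  let idx := p.1; let ti := p.2
  let pf := if findS = false ∧ ti ≥ 217 then (idx, true) else (p1, findS)
  if ti > T then (ti, idx, pf.1, pf.2) else (T, index, pf.1, pf.2)

def getTI (x : List Int) (y : List Int) : Int × Int × Int :=
  let st := (PySem.List.enumerate y 0).foldl getTI_step (-1, -1, 0, false)
  (st.1, st.2.1, st.2.2.1)

-- ===== PORT B =====
-- next((i for i, v in enumerate(y) if v >= 217), 0)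
def getTI_first217 : List (Int × Int) → Int
  | [] => 0
  | (i, v) :: t => if v ≥ 217 then i else getTI_first217 t

def getTI_alt (x : List Int) (y : List Int) : Int × Int × Int :=
  let T := (PySem.List.max? y (fun v => v)).getD (-1)
  let p1 := getTI_first217 (PySem.List.enumerate y 0)
  if T ≤ -1 then (-1, -1, p1)
  else (T, (((PySem.List.index? y T).getD 0 : Nat) : Int), p1)

-- ===== PRECONDITION & SPEC =====
def Spec_getTI (x : List Int) (y : List Int) (out : Int × Int × Int) : Prop := out = getTI_alt x y
instance (x : List Int) (y : List Int) (out : Int × Int × Int) : Decidable (Spec_getTI x y out) := by unfold Spec_getTI; infer_instance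

-- ===== CLAIM (what is proved, stated in full; the proofs are below) =====
def Claim_equal_getTI : Prop := ∀ (x : List Int) (y : List Int), Dom_getTI x y → Spec_getTI x y (getTI x y)

-- ===== LEMMAS AND PROOFS =====

-- A's loop, split into its two independent components
def runMax : List Int → Int → Int → Int → Int × Int
  | [], T, idx, _ => (T, idx)
  | v :: t, T, idx, i => if v > T then runMax t v i (i+1) else runMax t T idx (i+1)

def runP1 : List Int → Int → Bool → Int → Int × Bool
  | [], p1, fs, _ => (p1, fs)
  | v :: t, p1, fs, i => if fs = false ∧ v ≥ 217 then runP1 t i true (i+1) else runP1 t p1 fs (i+1)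

lemma foldl_split (y : List Int) : ∀ (T idx p1 : Int) (fs : Bool) (i : Int),
    (PySem.List.enumerate y i).foldl getTI_step (T, idx, p1, fs)
      = ((runMax y T idx i).1, (runMax y T idx i).2,
         (runP1 y p1 fs i).1, (runP1 y p1 fs i).2) := by
  induction y with
  | nil => intro T idx p1 fs i; simp [PySem.List.enumerate_nil, runMax, runP1]
  | cons v t ih =>
    intro T idx p1 fs i
    rw [PySem.List.enumerate_cons]
    simp only [List.foldl_cons, getTI_step, runMax, runP1]
    by_cases h1 : fs = false ∧ v ≥ 217 <;> by_cases h2 : v > T <;>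
      simp [h1, h2, ih]

lemma runP1_true (t : List Int) : ∀ (p1 i : Int), runP1 t p1 true i = (p1, true) := by
  induction t with
  | nil => intro p1 i; rfl
  | cons v s ih => intro p1 i; simp [runP1, ih]

lemma runP1_first217 (y : List Int) : ∀ (i : Int),
    (runP1 y 0 false i).1 = getTI_first217 (PySem.List.enumerate y i) := by
  induction y with
  | nil => intro i; simp [runP1, PySem.List.enumerate_nil, getTI_first217]
  | cons v t ih =>
    intro i
    rw [PySem.List.enumerate_cons]
    by_cases h : v ≥ 217
    · simp [runP1, getTI_first217, h, runP1_true]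
    · simp [runP1, getTI_first217, h, ih]

lemma foldl_max_max (s : List Int) : ∀ (a b : Int), s.foldl max (max a b) = max a (s.foldl max b) := by
  induction s with
  | nil => intro a b; rfl
  | cons w r ih =>
    intro a b
    simp only [List.foldl_cons]
    rw [max_assoc, ih]

lemma foldl_max_mem (s : List Int) : ∀ (a : Int), s.foldl max a ∈ a :: s := by
  induction s with
  | nil => intro a; simp
  | cons w r ih =>
    intro a
    simp only [List.foldl_cons, List.mem_cons]
    rcases List.mem_cons.mp (ih (max a w)) with h | h
    · rcases max_choice a w with h' | h'
      · left; rw [h, h']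
      · right; left; rw [h, h']
    · right; right; exact h

lemma runMax_eq (v : Int) (t : List Int) : ∀ (T idx i : Int),
    runMax (v :: t) T idx i =
      (if T < t.foldl max v
        then (t.foldl max v, i + (((PySem.List.index? (v :: t) (t.foldl max v)).getD 0 : Nat) : Int))
        else (T, idx)) := by
  induction t generalizing v with
  | nil =>
    intro T idx i
    simp only [runMax, List.foldl_nil]
    by_cases h : v > T
    · simp [h]
    · simp [show ¬ T < v from h]
  | cons w s ih =>
    intro T idx i
    have hm : (w :: s).foldl max v = max v (s.foldl max w) := by
      simp only [List.foldl_cons]; rw [foldl_max_max]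
    have hmem : s.foldl max w ∈ w :: s := foldl_max_mem s w
    rw [runMax]
    by_cases h2 : v > T
    · rw [if_pos h2, ih w v i (i+1), hm]
      by_cases h3 : v < s.foldl max w
      · have hne : v ≠ s.foldl max w := ne_of_lt h3
        have hidx : PySem.List.index? (v :: w :: s) (s.foldl max w)
            = (PySem.List.index? (w :: s) (s.foldl max w)).map (· + 1) :=
          PySem.List.index?_cons_of_ne _ hne
        obtain ⟨k, hk⟩ : ∃ k, PySem.List.index? (w :: s) (s.foldl max w) = some k :=
          Option.isSome_iff_exists.mp
            ((PySem.List.index?_isSome_iff (xs := w :: s) (v := s.foldl max w)).mpr hmem)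
        have hmax : max v (s.foldl max w) = s.foldl max w := max_eq_right (le_of_lt h3)
        rw [hmax, hidx, hk]
        simp [h3, show T < s.foldl max w from lt_trans h2 h3]
        ring
      · have hmax : max v (s.foldl max w) = v := max_eq_left (le_of_not_gt h3)
        rw [hmax, PySem.List.index?_cons_self]
        simp [h3, h2]
    · rw [if_neg h2, ih w T idx (i+1), hm]
      by_cases h3 : T < s.foldl max w
      · have hvlt : v ≤ T := le_of_not_gt h2
        have hne : v ≠ s.foldl max w := ne_of_lt (lt_of_le_of_lt hvlt h3)
        have hidx : PySem.List.index? (v :: w :: s) (s.foldl max w)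
            = (PySem.List.index? (w :: s) (s.foldl max w)).map (· + 1) :=
          PySem.List.index?_cons_of_ne _ hne
        obtain ⟨k, hk⟩ : ∃ k, PySem.List.index? (w :: s) (s.foldl max w) = some k :=
          Option.isSome_iff_exists.mp
            ((PySem.List.index?_isSome_iff (xs := w :: s) (v := s.foldl max w)).mpr hmem)
        have hmax : max v (s.foldl max w) = s.foldl max w :=
          max_eq_right (le_trans hvlt (le_of_lt h3))
        rw [hmax, hidx, hk]
        simp [h3]
        ring
      · have hle : s.foldl max w ≤ T := le_of_not_gt h3
        have : ¬ T < max v (s.foldl max w) := by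
          rw [not_lt, max_le_iff]; exact ⟨le_of_not_gt h2, hle⟩
        simp [h3, this]

-- ===== VERDICT (by name: the statement is the Claim_ definition above) =====
theorem getTI_spec : Claim_equal_getTI := by
  intro x y _
  unfold Spec_getTI getTI getTI_alt
  rw [foldl_split]
  cases y with
  | nil => simp [runMax, runP1, PySem.List.max?, PySem.List.enumerate_nil, getTI_first217]
  | cons v t =>
    rw [runMax_eq, runP1_first217]
    rw [PySem.List.max?_id_cons]
    simp only [Option.getD_some]
    by_cases h : t.foldl max v ≤ -1
    · simp [show ¬ (-1:Int) < t.foldl max v from not_lt.mpr h, h]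
    · simp [show (-1:Int) < t.foldl max v from lt_of_not_ge h, h]
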